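-- pv_equiv track=rewrite | github.com/tueda/tueda.github.io | ext/mdx_bibtex.py | _latex_to_unicode
-- ===== SOURCE A (Python) =====
-- def _latex_to_unicode(s):
--     # Accent and special characters in LaTeX.
--     simple_replacements = {
--         '\\"A': u"\u00C4",
--         '\\"a': u"\u00E4",
--         '\\"O': u"\u00D6",
--         '\\"o': u"\u00F6",
--         '\\"U': u"\u00DC",
--         '\\"u': u"\u00FC",
--         "\\'i": u"\u00ED",
--     }
--
--     for r in simple_replacements:
--         # One often writes {\"o} in BibTeX: the curly braces should be
--         # removed.
--         s = s.replace('{{{0}}}'.format(r), simple_replacements[r])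
--         s = s.replace(r, simple_replacements[r])
--
--     return s
-- ===== SOURCE B (Python) =====
-- def _latex_to_unicode(s):
--     # Single left-to-right scan: at each position try "{tok}" first, then bare
--     # tok, else copy the character; replaces A's 14 whole-string replace passes.
--     table = {
--         '\\"A': u"\u00C4",
--         '\\"a': u"\u00E4",
--         '\\"O': u"\u00D6",
--         '\\"o': u"\u00F6",
--         '\\"U': u"\u00DC",
--         '\\"u': u"\u00FC",
--         "\\'i": u"\u00ED",
--     }
--     out = []
--     i = 0
--     n = len(s)
--     while i < n:
--         if s[i] == '{' and s[i + 1:i + 4] in table and s.startswith('}', i + 4):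
--             out.append(table[s[i + 1:i + 4]])
--             i += 5
--         elif s[i:i + 3] in table:
--             out.append(table[s[i:i + 3]])
--             i += 3
--         else:
--             out.append(s[i])
--             i += 1
--     return ''.join(out)
-- ===== Notes on version B (the rewrite author's own statement) =====
-- stated objective: alternative
-- what changed: Replaces A's 14 sequential whole-string str.replace passes (braced then bare form of each of 7 LaTeX accent tokens) by a single left-to-right scan that at each position tries the braced token, then the bare token, else copies the character.
import Mathlib
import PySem

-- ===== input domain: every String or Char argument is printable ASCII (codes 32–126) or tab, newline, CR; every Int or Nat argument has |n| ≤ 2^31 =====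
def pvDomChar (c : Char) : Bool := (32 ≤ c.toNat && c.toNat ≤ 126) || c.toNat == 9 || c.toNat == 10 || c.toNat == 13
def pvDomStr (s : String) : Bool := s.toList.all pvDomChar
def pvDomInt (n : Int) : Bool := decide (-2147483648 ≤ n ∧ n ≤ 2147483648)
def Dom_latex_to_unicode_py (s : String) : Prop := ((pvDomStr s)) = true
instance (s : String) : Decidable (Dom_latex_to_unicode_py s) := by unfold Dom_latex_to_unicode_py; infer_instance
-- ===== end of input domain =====

-- B replaces A's 14 sequential whole-string replace passes by one left-to-right scan
-- (braced token preferred, then bare token, else copy the character); equal return value, no speed claim.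

-- ===== PORT A =====
-- A iterates the dict in insertion order; for each key r it first replaces
-- '{{{0}}}'.format(r) (written here as the literal braced string) and then r itself.
def repsA : List (String × String × String) :=
  [("{\\\"A}", "\\\"A", "Ä"),
   ("{\\\"a}", "\\\"a", "ä"),
   ("{\\\"O}", "\\\"O", "Ö"),
   ("{\\\"o}", "\\\"o", "ö"),
   ("{\\\"U}", "\\\"U", "Ü"),
   ("{\\\"u}", "\\\"u", "ü"),
   ("{\\'i}", "\\'i", "í")]

def latex_to_unicode_py (s : String) : String :=
  repsA.foldl (fun s p => PySem.Str.replace (PySem.Str.replace s p.1 p.2.2) p.2.1 p.2.2) s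

-- ===== PORT B =====
-- lookup of a bare 3-char token (the `in table` test of Source B)
def bareTok (a b c : Char) : Option Char :=
  if a = '\\' ∧ b = '"' ∧ c = 'A' then some 'Ä'
  else if a = '\\' ∧ b = '"' ∧ c = 'a' then some 'ä'
  else if a = '\\' ∧ b = '"' ∧ c = 'O' then some 'Ö'
  else if a = '\\' ∧ b = '"' ∧ c = 'o' then some 'ö'
  else if a = '\\' ∧ b = '"' ∧ c = 'U' then some 'Ü'
  else if a = '\\' ∧ b = '"' ∧ c = 'u' then some 'ü'
  else if a = '\\' ∧ b = '\'' ∧ c = 'i' then some 'í'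
  else none

-- Source B's first branch: s[i]=='{' and s[i+1:i+4] in table and s.startswith('}', i+4)
def bracedAt (l : List Char) : Option (Char × List Char) :=
  match l with
  | c0 :: a :: b :: c :: c4 :: rest =>
      if c0 = '{' ∧ c4 = '}' then (bareTok a b c).map (fun r => (r, rest)) else none
  | _ => none

-- Source B's second branch: s[i:i+3] in table
def bareAt (l : List Char) : Option (Char × List Char) :=
  match l with
  | a :: b :: c :: rest => (bareTok a b c).map (fun r => (r, rest))
  | _ => none

-- length facts cited by scan's termination proof
theorem bracedAt_length {l : List Char} {r : Char} {rest : List Char}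
    (h : bracedAt l = some (r, rest)) : rest.length + 5 = l.length := by
  rcases l with _ | ⟨c0, _ | ⟨a, _ | ⟨b, _ | ⟨c, _ | ⟨c4, t⟩⟩⟩⟩⟩ <;>
    simp [bracedAt] at h
  rw [← h.2.2]; simp

theorem bareAt_length {l : List Char} {r : Char} {rest : List Char}
    (h : bareAt l = some (r, rest)) : rest.length + 3 = l.length := by
  rcases l with _ | ⟨a, _ | ⟨b, _ | ⟨c, t⟩⟩⟩ <;> simp [bareAt] at h
  rw [← h.2]; simp

-- the single left-to-right scan of Source B's while loop
def scan (l : List Char) : List Char :=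
  match _hb : bracedAt l with
  | some (r, rest) => r :: scan rest
  | none =>
    match _h2 : bareAt l with
    | some (r, rest) => r :: scan rest
    | none =>
      match l with
      | [] => []
      | c :: t => c :: scan t
termination_by l.length
decreasing_by
  · have := bracedAt_length _hb; omega
  · have := bareAt_length _h2; omega
  · simp

def latex_to_unicode_py_alt (s : String) : String := String.ofList (scan s.toList)

-- ===== PRECONDITION & SPEC =====
def Spec_latex_to_unicode_py (s : String) (out : String) : Prop := out = latex_to_unicode_py_alt s
instance (s : String) (out : String) : Decidable (Spec_latex_to_unicode_py s out) := by unfold Spec_latex_to_unicode_py; infer_instance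

-- ===== CLAIM (what is proved, stated in full; the proofs are below) =====
def Claim_equal_latex_to_unicode_py : Prop := ∀ (s : String), Dom_latex_to_unicode_py s → Spec_latex_to_unicode_py s (latex_to_unicode_py s)

-- ===== LEMMAS AND PROOFS =====

-- A pure scan form of Python's str.replace (nonempty pattern o::os).
def repl (o : Char) (os newl : List Char) : List Char → List Char
  | [] => []
  | c :: t =>
      if (o :: os).isPrefixOf (c :: t) then newl ++ repl o os newl (t.drop os.length)
      else c :: repl o os newl t
termination_by l => l.length
decreasing_by
  · simp only [List.length_cons, List.length_drop]; omega
  · simp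

theorem go_eq (o : Char) (os newl : List Char) :
    ∀ fuel l acc, l.length ≤ fuel →
      PySem.Chars.replace.go (o :: os) newl fuel l acc = acc.reverse ++ repl o os newl l := by
  intro fuel
  induction fuel with
  | zero =>
      intro l acc h
      have : l = [] := by cases l <;> simp_all
      subst this
      simp [PySem.Chars.replace.go, repl]
  | succ n ih =>
      intro l acc h
      cases l with
      | nil => simp [PySem.Chars.replace.go, repl]
      | cons c t =>
          rw [PySem.Chars.replace.go, repl]
          by_cases hp : (o :: os).isPrefixOf (c :: t) = true
          · simp only [hp, if_true]
            have hlen : (t.drop os.length).length ≤ n := by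
              have : (t.drop os.length).length ≤ t.length := by simp
              simp at h; omega
            rw [show List.drop (o :: os).length (c :: t) = t.drop os.length by simp]
            rw [ih _ _ hlen]
            simp
          · simp only [hp]
            have hlen : t.length ≤ n := by simp at h; omega
            rw [ih _ _ hlen]
            simp

theorem replace_eq_repl (o : Char) (os newl l : List Char) :
    PySem.Chars.replace l (o :: os) newl = repl o os newl l := by
  rw [PySem.Chars.replace]
  simp only [List.isEmpty_cons, if_false, Bool.false_eq_true]
  rw [go_eq o os newl l.length l [] le_rfl]
  simp

theorem repl_nil (o : Char) (os newl : List Char) : repl o os newl [] = [] := by rw [repl]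

theorem repl_pos {o : Char} {os : List Char} (newl : List Char) {c : Char} {t : List Char}
    (h : (o :: os).isPrefixOf (c :: t) = true) :
    repl o os newl (c :: t) = newl ++ repl o os newl (t.drop os.length) := by
  rw [repl, if_pos h]

theorem repl_neg {o : Char} {os : List Char} (newl : List Char) {c : Char} {t : List Char}
    (h : ¬ (o :: os).isPrefixOf (c :: t) = true) :
    repl o os newl (c :: t) = c :: repl o os newl t := by
  rw [repl, if_neg h]

theorem repl_prefix_append (o : Char) (os newl X : List Char) :
    repl o os newl ((o :: os) ++ X) = newl ++ repl o os newl X := by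
  have h : (o :: os).isPrefixOf (o :: (os ++ X)) = true := by
    rw [List.isPrefixOf_iff_prefix, List.cons_prefix_cons]
    exact ⟨rfl, List.prefix_append _ _⟩
  rw [List.cons_append, repl_pos newl h, List.drop_left]

-- a fully-ASCII list that is a prefix of the output of a replace-with-non-ASCII-char
-- pass was already a prefix of its input
theorem repl_ascii_prefix (o : Char) (os : List Char) (r : Char) (hr : 127 < r.toNat) :
    ∀ n l t, l.length ≤ n → (∀ c ∈ t, c.toNat < 128) → t <+: repl o os [r] l → t <+: l := by
  intro n
  induction n with
  | zero =>
      intro l t h _ hp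
      have : l = [] := by cases l <;> simp_all
      subst this
      rw [repl_nil] at hp
      simpa using hp
  | succ n ih =>
      intro l t h hA hp
      cases l with
      | nil => rw [repl_nil] at hp; simpa using hp
      | cons c t' =>
          by_cases hpre : (o :: os).isPrefixOf (c :: t') = true
          · rw [repl_pos _ hpre] at hp
            cases t with
            | nil => exact List.nil_prefix
            | cons th tt =>
                rw [List.singleton_append, List.cons_prefix_cons] at hp
                obtain ⟨rfl, -⟩ := hp
                exact absurd (hA th (by simp)) (by omega)
          · rw [repl_neg _ hpre] at hp
            cases t with
            | nil => exact List.nil_prefix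
            | cons th tt =>
                rw [List.cons_prefix_cons] at hp
                obtain ⟨rfl, htt⟩ := hp
                have h1 : tt <+: t' := by
                  refine ih t' tt (by simp at h; omega) (fun x hx => hA x (by simp [hx])) htt
                exact List.cons_prefix_cons.mpr ⟨rfl, h1⟩

-- 'pattern p cannot match anywhere that starts inside s, whatever follows s'
def clash (p s : List Char) : Bool := (p.take s.length).isPrefixOf s

theorem not_prefix_of_clash_false {p s : List Char} (h : clash p s = false) (X : List Char) :
    ¬ p <+: s ++ X := by
  intro hp
  have h1 : p.take s.length <+: s ++ X := (List.take_prefix _ _).trans hp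
  have h2 : p.take s.length <+: s :=
    List.prefix_of_prefix_length_le h1 (List.prefix_append _ _) (by simp)
  rw [clash] at h
  rw [← List.isPrefixOf_iff_prefix] at h2
  simp [h2] at h

theorem repl_append (o : Char) (os newl : List Char) :
    ∀ s X, (∀ j, j < s.length → clash (o :: os) (s.drop j) = false) →
      repl o os newl (s ++ X) = s ++ repl o os newl X := by
  intro s
  induction s with
  | nil => intro X _; simp
  | cons c s' ih =>
      intro X h
      have h0 : ¬ (o :: os).isPrefixOf ((c :: s') ++ X) = true := by
        intro hpf
        exact not_prefix_of_clash_false (h 0 (by simp)) X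
          (List.isPrefixOf_iff_prefix.mp hpf)
      rw [List.cons_append, repl_neg _ (by simpa using h0), ih X (fun j hj => h (j + 1) (by simpa using hj))]
      simp

-- run A's passes (pattern, replacement char) left to right
def runP (ps : List (List Char × Char)) (l : List Char) : List Char :=
  ps.foldl (fun l p => match p.1 with | [] => l | o :: os => repl o os [p.2] l) l

def passes : List (List Char × Char) :=
  [(['{','\\','"','A','}'],'Ä'), (['\\','"','A'],'Ä'),
   (['{','\\','"','a','}'],'ä'), (['\\','"','a'],'ä'),
   (['{','\\','"','O','}'],'Ö'), (['\\','"','O'],'Ö'),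
   (['{','\\','"','o','}'],'ö'), (['\\','"','o'],'ö'),
   (['{','\\','"','U','}'],'Ü'), (['\\','"','U'],'Ü'),
   (['{','\\','"','u','}'],'ü'), (['\\','"','u'],'ü'),
   (['{','\\','\'','i','}'],'í'), (['\\','\'','i'],'í')]

theorem runP_cons (p : List Char × Char) (ps : List (List Char × Char)) (l : List Char) :
    runP (p :: ps) l = runP ps (match p.1 with | [] => l | o :: os => repl o os [p.2] l) := rfl

theorem runP_append (l1 l2 : List (List Char × Char)) (x : List Char) :
    runP (l1 ++ l2) x = runP l2 (runP l1 x) := by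
  simp [runP, List.foldl_append]

theorem runP_nil (ps : List (List Char × Char)) (h : ∀ p ∈ ps, p.1 ≠ []) :
    runP ps [] = [] := by
  induction ps with
  | nil => rfl
  | cons p ps ih =>
      rw [runP_cons]
      have h1 := h p (by simp)
      cases hp : p.1 with
      | nil => exact absurd hp h1
      | cons o os =>
          simp only [repl_nil]
          exact ih (fun q hq => h q (by simp [hq]))

theorem runP_cons_head (ps : List (List Char × Char)) (r : Char)
    (h : ∀ p ∈ ps, p.1.head? ≠ some r ∧ p.1 ≠ []) :
    ∀ Z, runP ps (r :: Z) = r :: runP ps Z := by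
  induction ps with
  | nil => intro Z; rfl
  | cons p ps ih =>
      intro Z
      obtain ⟨hh, hne⟩ := h p (by simp)
      cases hp : p.1 with
      | nil => exact absurd hp hne
      | cons o os =>
          rw [runP_cons, runP_cons]
          simp only [hp]
          have hno : ¬ (o :: os).isPrefixOf (r :: Z) = true := by
            rw [List.isPrefixOf_iff_prefix, List.cons_prefix_cons]
            rintro ⟨rfl, -⟩
            exact hh (by simp [hp])
          rw [repl_neg _ hno]
          exact ih (fun q hq => h q (by simp [hq])) (repl o os [p.2] Z)

def PatOK (p : List Char × Char) : Prop :=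
  p.1 ≠ [] ∧ (∀ ch ∈ p.1, ch.toNat < 128) ∧ 127 < p.2.toNat

theorem runP_no_match (ps : List (List Char × Char)) (hps : ∀ p ∈ ps, PatOK p) (c : Char) :
    ∀ Y, (∀ p ∈ ps, ¬ p.1 <+: c :: Y) → runP ps (c :: Y) = c :: runP ps Y := by
  induction ps with
  | nil => intro Y _; rfl
  | cons p ps ih =>
      intro Y h
      obtain ⟨hne, hA, hr⟩ := hps p (by simp)
      cases hp : p.1 with
      | nil => exact absurd hp hne
      | cons o os =>
          rw [runP_cons, runP_cons]
          simp only [hp]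
          have hno : ¬ (o :: os).isPrefixOf (c :: Y) = true := by
            rw [List.isPrefixOf_iff_prefix]
            intro hpf
            exact h p (by simp) (by rw [hp]; exact hpf)
          rw [repl_neg _ hno]
          refine ih (fun q hq => hps q (by simp [hq])) (repl o os [p.2] Y) ?_
          intro q hq hqpf
          obtain ⟨qne, qA, -⟩ := hps q (by simp [hq])
          cases hq1 : q.1 with
          | nil => exact qne hq1
          | cons qh qt =>
              rw [hq1, List.cons_prefix_cons] at hqpf
              obtain ⟨rfl, hqt⟩ := hqpf
              have hqtA : ∀ x ∈ qt, x.toNat < 128 := fun x hx => qA x (by simp [hq1, hx])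
              have := repl_ascii_prefix o os p.2 hr Y.length Y qt le_rfl hqtA hqt
              exact h q (by simp [hq]) (by rw [hq1]; exact List.cons_prefix_cons.mpr ⟨rfl, this⟩)

theorem runP_skip (ps : List (List Char × Char)) (pat : List Char)
    (hpre : ∀ p ∈ ps, ∀ j, j < pat.length → clash p.1 (pat.drop j) = false) :
    ∀ Y, runP ps (pat ++ Y) = pat ++ runP ps Y := by
  induction ps with
  | nil => intro Y; rfl
  | cons p ps ih =>
      intro Y
      rw [runP_cons, runP_cons]
      cases hp : p.1 with
      | nil =>
          simp only
          exact ih (fun q hq j hj => hpre q (by simp [hq]) j hj) Y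
      | cons o os =>
          simp only
          rw [repl_append o os [p.2] pat Y (by
            intro j hj
            have := hpre p (by simp) j hj
            rw [hp] at this; exact this)]
          exact ih (fun q hq j hj => hpre q (by simp [hq]) j hj) (repl o os [p.2] Y)

theorem runP_match_split (ps pre : List (List Char × Char)) (pk : List Char × Char)
    (post : List (List Char × Char)) (rest : List Char)
    (hsplit : ps = pre ++ pk :: post) (hk : pk.1 ≠ [])
    (hpre : ∀ p ∈ pre, ∀ j, j < pk.1.length → clash p.1 (pk.1.drop j) = false)
    (hpost : ∀ p ∈ post, p.1.head? ≠ some pk.2 ∧ p.1 ≠ []) :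
    runP ps (pk.1 ++ rest) = pk.2 :: runP ps rest := by
  subst hsplit
  have hpreP := runP_skip pre pk.1 hpre
  cases hk1 : pk.1 with
  | nil => exact absurd hk1 hk
  | cons o os =>
      rw [hk1] at hpreP
      rw [runP_append, runP_append, hpreP rest, runP_cons, runP_cons]
      simp only [hk1]
      rw [repl_prefix_append, List.singleton_append, runP_cons_head post pk.2 hpost]

theorem scan_nil : scan [] = [] := by
  rw [scan]
  simp [bracedAt, bareAt]

theorem scan_braced {l : List Char} {r : Char} {rest : List Char}
    (h : bracedAt l = some (r, rest)) : scan l = r :: scan rest := by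
  rw [scan]
  split <;> simp_all

theorem scan_bare {l : List Char} {r : Char} {rest : List Char}
    (hb : bracedAt l = none) (h : bareAt l = some (r, rest)) : scan l = r :: scan rest := by
  rw [scan]
  split
  · simp_all
  · split <;> simp_all

theorem scan_cons_none {c : Char} {t : List Char}
    (hb : bracedAt (c :: t) = none) (h2 : bareAt (c :: t) = none) :
    scan (c :: t) = c :: scan t := by
  rw [scan]
  split
  · simp_all
  · split <;> simp_all

theorem bracedAt_inv {l : List Char} {r : Char} {rest : List Char}
    (h : bracedAt l = some (r, rest)) :
    ∃ a b c, l = '{' :: a :: b :: c :: '}' :: rest ∧ bareTok a b c = some r := by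
  rcases l with _ | ⟨c0, _ | ⟨a, _ | ⟨b, _ | ⟨c, _ | ⟨c4, t⟩⟩⟩⟩⟩ <;> simp [bracedAt] at h
  obtain ⟨⟨rfl, rfl⟩, htok, rfl⟩ := h
  exact ⟨a, b, c, rfl, htok⟩

theorem bareAt_inv {l : List Char} {r : Char} {rest : List Char}
    (h : bareAt l = some (r, rest)) :
    ∃ a b c, l = a :: b :: c :: rest ∧ bareTok a b c = some r := by
  rcases l with _ | ⟨a, _ | ⟨b, _ | ⟨c, t⟩⟩⟩ <;> simp [bareAt] at h
  obtain ⟨htok, rfl⟩ := h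
  exact ⟨a, b, c, rfl, htok⟩

theorem no_match_of_none {l : List Char}
    (hb : bracedAt l = none) (h2 : bareAt l = none) :
    ∀ p ∈ passes, ¬ p.1 <+: l := by
  intro p hp hpf
  obtain ⟨t, rfl⟩ := hpf
  fin_cases hp <;> simp_all [bracedAt, bareAt, bareTok, List.cons_append]

set_option maxRecDepth 8000 in
theorem passes_PatOK : ∀ p ∈ passes, PatOK p := by
  intro p hp
  fin_cases hp <;> exact ⟨by simp, by simp, by decide⟩

theorem runP_eq_scan : ∀ n l, l.length ≤ n → runP passes l = scan l := by
  intro n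
  induction n with
  | zero =>
      intro l h
      have hl : l = [] := by cases l <;> simp_all
      subst hl
      rw [scan_nil]
      exact runP_nil passes (by decide)
  | succ n ih =>
      intro l h
      cases hb : bracedAt l with
      | some pr =>
          obtain ⟨r, rest⟩ := pr
          rw [scan_braced hb]
          obtain ⟨a, b, c, rfl, htok⟩ := bracedAt_inv hb
          have hlen : rest.length ≤ n := by simp at h; omega
          simp only [bareTok] at htok
          split_ifs at htok with h1 h2 h3 h4 h5 h6 h7
          · obtain ⟨rfl, rfl, rfl⟩ := h1
            injection htok with hu; subst hu
            rw [show ('{' :: '\\' :: '"' :: 'A' :: '}' :: rest) = (['{','\\','"','A','}'] : List Char) ++ rest from rfl]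
            rw [runP_match_split passes (passes.take 0) (['{','\\','"','A','}'], 'Ä') (passes.drop 1) rest rfl (by decide) (by decide) (by decide)]
            exact congrArg _ (ih rest hlen)
          · obtain ⟨rfl, rfl, rfl⟩ := h2
            injection htok with hu; subst hu
            rw [show ('{' :: '\\' :: '"' :: 'a' :: '}' :: rest) = (['{','\\','"','a','}'] : List Char) ++ rest from rfl]
            rw [runP_match_split passes (passes.take 2) (['{','\\','"','a','}'], 'ä') (passes.drop 3) rest rfl (by decide) (by decide) (by decide)]
            exact congrArg _ (ih rest hlen)
          · obtain ⟨rfl, rfl, rfl⟩ := h3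
            injection htok with hu; subst hu
            rw [show ('{' :: '\\' :: '"' :: 'O' :: '}' :: rest) = (['{','\\','"','O','}'] : List Char) ++ rest from rfl]
            rw [runP_match_split passes (passes.take 4) (['{','\\','"','O','}'], 'Ö') (passes.drop 5) rest rfl (by decide) (by decide) (by decide)]
            exact congrArg _ (ih rest hlen)
          · obtain ⟨rfl, rfl, rfl⟩ := h4
            injection htok with hu; subst hu
            rw [show ('{' :: '\\' :: '"' :: 'o' :: '}' :: rest) = (['{','\\','"','o','}'] : List Char) ++ rest from rfl]
            rw [runP_match_split passes (passes.take 6) (['{','\\','"','o','}'], 'ö') (passes.drop 7) rest rfl (by decide) (by decide) (by decide)]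
            exact congrArg _ (ih rest hlen)
          · obtain ⟨rfl, rfl, rfl⟩ := h5
            injection htok with hu; subst hu
            rw [show ('{' :: '\\' :: '"' :: 'U' :: '}' :: rest) = (['{','\\','"','U','}'] : List Char) ++ rest from rfl]
            rw [runP_match_split passes (passes.take 8) (['{','\\','"','U','}'], 'Ü') (passes.drop 9) rest rfl (by decide) (by decide) (by decide)]
            exact congrArg _ (ih rest hlen)
          · obtain ⟨rfl, rfl, rfl⟩ := h6
            injection htok with hu; subst hu
            rw [show ('{' :: '\\' :: '"' :: 'u' :: '}' :: rest) = (['{','\\','"','u','}'] : List Char) ++ rest from rfl]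
            rw [runP_match_split passes (passes.take 10) (['{','\\','"','u','}'], 'ü') (passes.drop 11) rest rfl (by decide) (by decide) (by decide)]
            exact congrArg _ (ih rest hlen)
          · obtain ⟨rfl, rfl, rfl⟩ := h7
            injection htok with hu; subst hu
            rw [show ('{' :: '\\' :: '\'' :: 'i' :: '}' :: rest) = (['{','\\','\'','i','}'] : List Char) ++ rest from rfl]
            rw [runP_match_split passes (passes.take 12) (['{','\\','\'','i','}'], 'í') (passes.drop 13) rest rfl (by decide) (by decide) (by decide)]
            exact congrArg _ (ih rest hlen)
      | none =>
        cases h2 : bareAt l with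
        | some pr =>
            obtain ⟨r, rest⟩ := pr
            rw [scan_bare hb h2]
            obtain ⟨a, b, c, rfl, htok⟩ := bareAt_inv h2
            have hlen : rest.length ≤ n := by simp at h; omega
            simp only [bareTok] at htok
            split_ifs at htok with h1 h2' h3 h4 h5 h6 h7
            · obtain ⟨rfl, rfl, rfl⟩ := h1
              injection htok with hu; subst hu
              rw [show ('\\' :: '"' :: 'A' :: rest) = (['\\','"','A'] : List Char) ++ rest from rfl]
              rw [runP_match_split passes (passes.take 1) (['\\','"','A'], 'Ä') (passes.drop 2) rest rfl (by decide) (by decide) (by decide)]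
              exact congrArg _ (ih rest hlen)
            · obtain ⟨rfl, rfl, rfl⟩ := h2'
              injection htok with hu; subst hu
              rw [show ('\\' :: '"' :: 'a' :: rest) = (['\\','"','a'] : List Char) ++ rest from rfl]
              rw [runP_match_split passes (passes.take 3) (['\\','"','a'], 'ä') (passes.drop 4) rest rfl (by decide) (by decide) (by decide)]
              exact congrArg _ (ih rest hlen)
            · obtain ⟨rfl, rfl, rfl⟩ := h3
              injection htok with hu; subst hu
              rw [show ('\\' :: '"' :: 'O' :: rest) = (['\\','"','O'] : List Char) ++ rest from rfl]
              rw [runP_match_split passes (passes.take 5) (['\\','"','O'], 'Ö') (passes.drop 6) rest rfl (by decide) (by decide) (by decide)]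
              exact congrArg _ (ih rest hlen)
            · obtain ⟨rfl, rfl, rfl⟩ := h4
              injection htok with hu; subst hu
              rw [show ('\\' :: '"' :: 'o' :: rest) = (['\\','"','o'] : List Char) ++ rest from rfl]
              rw [runP_match_split passes (passes.take 7) (['\\','"','o'], 'ö') (passes.drop 8) rest rfl (by decide) (by decide) (by decide)]
              exact congrArg _ (ih rest hlen)
            · obtain ⟨rfl, rfl, rfl⟩ := h5
              injection htok with hu; subst hu
              rw [show ('\\' :: '"' :: 'U' :: rest) = (['\\','"','U'] : List Char) ++ rest from rfl]
              rw [runP_match_split passes (passes.take 9) (['\\','"','U'], 'Ü') (passes.drop 10) rest rfl (by decide) (by decide) (by decide)]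
              exact congrArg _ (ih rest hlen)
            · obtain ⟨rfl, rfl, rfl⟩ := h6
              injection htok with hu; subst hu
              rw [show ('\\' :: '"' :: 'u' :: rest) = (['\\','"','u'] : List Char) ++ rest from rfl]
              rw [runP_match_split passes (passes.take 11) (['\\','"','u'], 'ü') (passes.drop 12) rest rfl (by decide) (by decide) (by decide)]
              exact congrArg _ (ih rest hlen)
            · obtain ⟨rfl, rfl, rfl⟩ := h7
              injection htok with hu; subst hu
              rw [show ('\\' :: '\'' :: 'i' :: rest) = (['\\','\'','i'] : List Char) ++ rest from rfl]
              rw [runP_match_split passes (passes.take 13) (['\\','\'','i'], 'í') (passes.drop 14) rest rfl (by decide) (by decide) (by decide)]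
              exact congrArg _ (ih rest hlen)
        | none =>
            cases l with
            | nil =>
                rw [scan_nil]
                exact runP_nil passes (by decide)
            | cons c t =>
                rw [scan_cons_none hb h2]
                rw [runP_no_match passes passes_PatOK c t (no_match_of_none hb h2)]
                exact congrArg _ (ih t (by simp at h; omega))

theorem A_toList (s : String) : (latex_to_unicode_py s).toList = runP passes s.toList := by
  simp only [latex_to_unicode_py, repsA, List.foldl_cons, List.foldl_nil, PySem.Str.toList_replace]
  simp only [show ("{\\\"A}" : String).toList = ['{','\\','"','A','}'] from rfl,
    show ("\\\"A" : String).toList = ['\\','"','A'] from rfl,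
    show ("{\\\"a}" : String).toList = ['{','\\','"','a','}'] from rfl,
    show ("\\\"a" : String).toList = ['\\','"','a'] from rfl,
    show ("{\\\"O}" : String).toList = ['{','\\','"','O','}'] from rfl,
    show ("\\\"O" : String).toList = ['\\','"','O'] from rfl,
    show ("{\\\"o}" : String).toList = ['{','\\','"','o','}'] from rfl,
    show ("\\\"o" : String).toList = ['\\','"','o'] from rfl,
    show ("{\\\"U}" : String).toList = ['{','\\','"','U','}'] from rfl,
    show ("\\\"U" : String).toList = ['\\','"','U'] from rfl,
    show ("{\\\"u}" : String).toList = ['{','\\','"','u','}'] from rfl,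
    show ("\\\"u" : String).toList = ['\\','"','u'] from rfl,
    show ("{\\'i}" : String).toList = ['{','\\','\'','i','}'] from rfl,
    show ("\\'i" : String).toList = ['\\','\'','i'] from rfl,
    show ("Ä" : String).toList = ['Ä'] from rfl,
    show ("ä" : String).toList = ['ä'] from rfl,
    show ("Ö" : String).toList = ['Ö'] from rfl,
    show ("ö" : String).toList = ['ö'] from rfl,
    show ("Ü" : String).toList = ['Ü'] from rfl,
    show ("ü" : String).toList = ['ü'] from rfl,
    show ("í" : String).toList = ['í'] from rfl,
    replace_eq_repl]
  rfl

-- ===== VERDICT (by name: the statement is the Claim_ definition above) =====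
theorem latex_to_unicode_py_spec : Claim_equal_latex_to_unicode_py := by
  intro s _
  unfold Spec_latex_to_unicode_py latex_to_unicode_py_alt
  have h1 : (latex_to_unicode_py s).toList = scan s.toList := by
    rw [A_toList, runP_eq_scan s.toList.length _ le_rfl]
  calc latex_to_unicode_py s = String.ofList (latex_to_unicode_py s).toList := by simp
    _ = String.ofList (scan s.toList) := by rw [h1]
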